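-- pv_equiv track=rewrite | github.com/reedylab/channelarr | core/xmltv.py | _merge_bump_gaps
-- ===== SOURCE A (Python) =====
-- def _merge_bump_gaps(entries_iter):
--     """Filter out bumps and extend each content entry's stop to the next content start.
--
--     This eliminates gaps in EPG/guide data caused by bump clips between programmes.
--     """
--     content = []
--     for entry in entries_iter:
--         if entry["type"] == "bump":
--             continue
--         content.append(dict(entry))
--
--     # Extend each entry's stop to the next entry's start
--     for i in range(len(content) - 1):
--         content[i]["stop"] = content[i + 1]["start"]
--
--     return content
-- ===== SOURCE B (Python) =====
-- def _merge_bump_gaps(entries_iter):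
--     """Filter out bumps and extend each content entry's stop to the next content start.
--
--     Builds the output back-to-front: traverse the entries in reverse carrying the
--     start of the most recently seen content entry, so each kept entry's stop is
--     final the moment it is emitted; reverse once at the end.
--     """
--     out = []
--     next_start = None
--     for entry in reversed(list(entries_iter)):
--         if entry["type"] == "bump":
--             continue
--         cur = dict(entry)
--         if next_start is not None:
--             cur["stop"] = next_start
--         next_start = entry.get("start")
--         out.append(cur)
--     out.reverse()
--     return out
-- ===== Notes on version B (the rewrite author's own statement) =====
-- stated objective: alternative
-- what changed: Instead of A's forward filter pass followed by an index loop rewriting content[i]['stop'], B traverses the entries in reverse carrying the next content entry's start, finalises each kept entry's stop the moment it is produced, and reverses the back-to-front output once at the end.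
import Mathlib
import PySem

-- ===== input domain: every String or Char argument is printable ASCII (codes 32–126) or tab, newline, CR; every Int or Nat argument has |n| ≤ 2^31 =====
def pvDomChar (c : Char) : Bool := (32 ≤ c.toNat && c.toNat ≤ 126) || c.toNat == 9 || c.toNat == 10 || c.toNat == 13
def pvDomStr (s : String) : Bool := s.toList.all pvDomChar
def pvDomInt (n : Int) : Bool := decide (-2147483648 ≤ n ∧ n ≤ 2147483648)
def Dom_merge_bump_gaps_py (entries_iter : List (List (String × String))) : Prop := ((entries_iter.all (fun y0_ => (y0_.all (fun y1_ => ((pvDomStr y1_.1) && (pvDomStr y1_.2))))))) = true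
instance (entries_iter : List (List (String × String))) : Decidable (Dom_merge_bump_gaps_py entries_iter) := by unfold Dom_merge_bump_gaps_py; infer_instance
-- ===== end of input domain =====

-- B replaces A's forward filter pass + index loop by a single reverse traversal
-- carrying the next content start, building the output back-to-front; return
-- values agree wherever A returns.

-- ===== PORT A =====
-- entry["type"] == "bump"  (first-match lookup on the entry dict)
def pvIsBump (e : List (String × String)) : Bool :=
  PySem.Dict.get? (PySem.Dict.mk e) "type" == some "bump"

-- content[i]["stop"] = content[i+1]["start"]  (dict assignment; KeyError on missing "start" is outside Pre_)
def pvStep (c : List (List (String × String))) (i : Int) : List (List (String × String)) :=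
  PySem.List.pySetD c i
    (PySem.Dict.insert (PySem.Dict.mk (PySem.List.pyGetD c i []))
      "stop"
      ((PySem.Dict.get? (PySem.Dict.mk (PySem.List.pyGetD c (i + 1) [])) "start").getD "")).items

def merge_bump_gaps_py (entries_iter : List (List (String × String))) : List (List (String × String)) :=
  -- first loop: content = [dict(e) for e in entries if e["type"] != "bump"]
  let content := entries_iter.foldl
    (fun acc e => if pvIsBump e then acc else acc ++ [e]) []
  -- second loop: for i in range(len(content) - 1): content[i]["stop"] = content[i+1]["start"]
  (PySem.List.pyRange 0 ((content.length : Int) - 1) 1).foldl pvStep content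

-- ===== PORT B =====
-- one step of Source B's reverse loop: state = (next_start, out so far, back-to-front)
def pvBStep (st : Option String × List (List (String × String)))
    (e : List (String × String)) : Option String × List (List (String × String)) :=
  if PySem.Dict.get? (PySem.Dict.mk e) "type" == some "bump" then st
  else
    let cur := match st.1 with
      | none => e                                                   -- cur = dict(entry), unpatched
      | some s => (PySem.Dict.insert (PySem.Dict.mk e) "stop" s).items  -- cur["stop"] = next_start
    (PySem.Dict.get? (PySem.Dict.mk e) "start",                     -- next_start = entry.get("start")
     st.2 ++ [cur])                                                 -- out.append(cur)

def merge_bump_gaps_py_alt (entries_iter : List (List (String × String))) : List (List (String × String)) :=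
  ((entries_iter.reverse.foldl pvBStep (none, [])).2).reverse       -- out.reverse(); return out

-- ===== PRECONDITION & SPEC =====
-- Pre_ excludes exactly the inputs on which A raises KeyError: an entry without a
-- "type" key, or a kept (non-bump) entry other than the first kept one without a
-- "start" key.
def Pre_merge_bump_gaps_py (entries_iter : List (List (String × String))) : Prop :=
  (entries_iter.all (fun e => PySem.Dict.contains (PySem.Dict.mk e) "type")
    && ((entries_iter.filter (fun e => !pvIsBump e)).drop 1).all
        (fun e => PySem.Dict.contains (PySem.Dict.mk e) "start")) = true
instance (entries_iter : List (List (String × String))) : Decidable (Pre_merge_bump_gaps_py entries_iter) := by unfold Pre_merge_bump_gaps_py; infer_instance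

def pvWitness_merge_bump_gaps_py : (List (List (String × String))) :=
  [[("type", "show"), ("start", "1"), ("stop", "2")],
   [("type", "bump"), ("start", "2")],
   [("type", "show"), ("start", "3"), ("stop", "4")]]

def Spec_merge_bump_gaps_py (entries_iter : List (List (String × String))) (out : List (List (String × String))) : Prop := out = merge_bump_gaps_py_alt entries_iter
instance (entries_iter : List (List (String × String))) (out : List (List (String × String))) : Decidable (Spec_merge_bump_gaps_py entries_iter out) := by unfold Spec_merge_bump_gaps_py; infer_instance

-- ===== CLAIM (what is proved, stated in full; the proofs are below) =====
def Claim_equal_merge_bump_gaps_py : Prop := ∀ (entries_iter : List (List (String × String))), Dom_merge_bump_gaps_py entries_iter → Pre_merge_bump_gaps_py entries_iter → Spec_merge_bump_gaps_py entries_iter (merge_bump_gaps_py entries_iter)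

-- ===== LEMMAS AND PROOFS =====

-- prev["stop"] = cur["start"]  (patch used by the canonical form)
def pvPatch (p e : List (String × String)) : List (String × String) :=
  (PySem.Dict.insert (PySem.Dict.mk p) "stop"
    ((PySem.Dict.get? (PySem.Dict.mk e) "start").getD "")).items

-- canonical form both ports reduce to: patch every kept entry with its successor's start
def pvLink : List (List (String × String)) → List (List (String × String))
  | [] => []
  | [c] => [c]
  | a :: b :: rest => pvPatch a b :: pvLink (b :: rest)

def pvStartD (e : List (String × String)) : String :=
  (PySem.Dict.get? (PySem.Dict.mk e) "start").getD ""

def pvPatchO (ns : Option String) (e : List (String × String)) : List (String × String) :=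
  match ns with
  | none => e
  | some s => (PySem.Dict.insert (PySem.Dict.mk e) "stop" s).items

-- B's reverse loop with the bump test still in place
def pvF (ns : Option String) : List (List (String × String)) → List (List (String × String))
  | [] => []
  | e :: r =>
    if PySem.Dict.get? (PySem.Dict.mk e) "type" == some "bump" then pvF ns r
    else pvPatchO ns e :: pvF (PySem.Dict.get? (PySem.Dict.mk e) "start") r

-- B's reverse loop after filtering
def pvG (ns : Option String) : List (List (String × String)) → List (List (String × String))
  | [] => []
  | e :: r => pvPatchO ns e :: pvG (PySem.Dict.get? (PySem.Dict.mk e) "start") r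

-- pvLink with an optional override for the LAST element's stop
def pvLink' : List (List (String × String)) → Option String → List (List (String × String))
  | [], _ => []
  | [c], ns => [pvPatchO ns c]
  | a :: b :: rest, ns => pvPatch a b :: pvLink' (b :: rest) ns

-- ---- A-side lemmas ----
lemma pvFilter_phase (l : List (List (String × String))) (acc : List (List (String × String))) :
    l.foldl (fun acc e => if pvIsBump e then acc else acc ++ [e]) acc
      = acc ++ l.filter (fun e => !pvIsBump e) := by
  induction l generalizing acc with
  | nil => simp
  | cons e rest ih =>
    by_cases h : pvIsBump e = true <;> simp [List.foldl_cons, h, ih]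

lemma pvStep_cons (x : List (String × String)) (xs : List (List (String × String)))
    (i : Int) (hi : 1 ≤ i) : pvStep (x :: xs) i = x :: pvStep xs (i - 1) := by
  obtain ⟨k, rfl⟩ : ∃ k : Nat, i = (k : Int) + 1 := ⟨(i - 1).toNat, by omega⟩
  have h1 : ((k : Int) + 1) = ((k + 1 : Nat) : Int) := by push_cast; ring
  have h2 : ((k : Int) + 1 + 1) = ((k + 2 : Nat) : Int) := by push_cast; ring
  have h3 : ((k : Int) + 1 - 1) = ((k : Nat) : Int) := by ring
  rw [h3]
  simp only [pvStep, h1, PySem.List.pySetD_natCast, PySem.List.pyGetD_natCast]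
  simp [List.getD]
  rw [h2, PySem.List.pyGetD_natCast]
  simp [List.getD]

lemma pvFold_shift (n : Nat) : ∀ (a b : Int), 1 ≤ a → (b - a).toNat = n →
    ∀ (x : List (String × String)) (xs : List (List (String × String))),
    (PySem.List.pyRange a b 1).foldl pvStep (x :: xs)
      = x :: (PySem.List.pyRange (a - 1) (b - 1) 1).foldl pvStep xs := by
  induction n with
  | zero =>
    intro a b ha hn x xs
    rw [PySem.List.pyRange_one_eq_nil (by omega), PySem.List.pyRange_one_eq_nil (by omega)]
    rfl
  | succ n ih =>
    intro a b ha hn x xs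
    rw [PySem.List.pyRange_one_cons (show a < b by omega),
      PySem.List.pyRange_one_cons (show a - 1 < b - 1 by omega)]
    rw [List.foldl_cons, List.foldl_cons]
    rw [pvStep_cons x xs a ha]
    rw [ih (a + 1) b (by omega) (by omega) x (pvStep xs (a - 1))]
    rw [show a + 1 - 1 = a - 1 + 1 from by ring]

lemma pvPhase2_link : ∀ (c : List (List (String × String))),
    (PySem.List.pyRange 0 ((c.length : Int) - 1) 1).foldl pvStep c = pvLink c := by
  intro c
  induction c with
  | nil => rw [PySem.List.pyRange_one_eq_nil (by simp)]; rfl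
  | cons a rest ih =>
    cases rest with
    | nil => rw [PySem.List.pyRange_one_eq_nil (by simp)]; rfl
    | cons b rest' =>
      have hlen : ((a :: b :: rest').length : Int) - 1 = ((b :: rest').length : Int) := by
        simp
      rw [hlen, PySem.List.pyRange_one_cons (by simp)]
      simp only [List.foldl_cons]
      have hstep0 : pvStep (a :: b :: rest') 0 = pvPatch a b :: b :: rest' := by
        simp [pvStep, pvPatch, PySem.List.pySetD_of_nonneg, PySem.List.pyGetD_of_nonneg]
      rw [hstep0, show (0:Int)+1 = 1 from rfl]
      have := pvFold_shift (((b :: rest').length : Int) - 1).toNat 1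
        ((b :: rest').length : Int) (by omega) (by omega) (pvPatch a b) (b :: rest')
      rw [this]
      simp only [show (1 : Int) - 1 = 0 from rfl]
      rw [ih]
      rfl

-- ---- B-side lemmas ----
lemma pvFoldB (l : List (List (String × String))) (ns : Option String)
    (acc : List (List (String × String))) :
    (l.foldl pvBStep (ns, acc)).2 = acc ++ pvF ns l := by
  induction l generalizing ns acc with
  | nil => simp [pvF]
  | cons e rest ih =>
    by_cases h : (PySem.Dict.get? (PySem.Dict.mk e) "type" == some "bump") = true
    · simp [List.foldl_cons, pvBStep, pvF, h, ih]
    · simp only [List.foldl_cons, pvBStep, pvF, h, Bool.false_eq_true, if_false]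
      rw [ih]
      cases ns <;> simp [pvPatchO]

lemma pvF_filter (l : List (List (String × String))) (ns : Option String) :
    pvF ns l = pvG ns (l.filter (fun e => !pvIsBump e)) := by
  induction l generalizing ns with
  | nil => rfl
  | cons e rest ih =>
    by_cases h : pvIsBump e = true
    · have h' : (PySem.Dict.get? (PySem.Dict.mk e) "type" == some "bump") = true := h
      simp [pvF, h, h', ih]
    · have h' : (PySem.Dict.get? (PySem.Dict.mk e) "type" == some "bump") = false := by
        simpa [pvIsBump] using h
      simp [pvF, pvG, h, h', ih]

lemma pvLink'_snoc : ∀ (xs : List (List (String × String))) (e : List (String × String))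
    (ns : Option String),
    pvLink' (xs ++ [e]) ns = pvLink' xs (some (pvStartD e)) ++ [pvPatchO ns e] := by
  intro xs
  induction xs with
  | nil => intro e ns; rfl
  | cons a xs' ih =>
    intro e ns
    cases xs' with
    | nil => rfl
    | cons b xs'' =>
      simp only [List.cons_append, pvLink']
      rw [← List.cons_append, ih e ns]

lemma pvG_link' : ∀ (r : List (List (String × String))) (ns : Option String),
    (∀ e ∈ r.dropLast, PySem.Dict.contains (PySem.Dict.mk e) "start" = true) →
    pvG ns r = (pvLink' r.reverse ns).reverse := by
  intro r
  induction r with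
  | nil => intro ns _; rfl
  | cons e rest ih =>
    intro ns hst
    cases rest with
    | nil => rfl
    | cons b rest' =>
      have he : PySem.Dict.contains (PySem.Dict.mk e) "start" = true := by
        exact hst e (by simp [List.dropLast])
      have hsome : PySem.Dict.get? (PySem.Dict.mk e) "start" = some (pvStartD e) := by
        rw [PySem.Dict.contains_eq_isSome_get?] at he
        obtain ⟨s, hs⟩ := Option.isSome_iff_exists.mp he
        simp [pvStartD, hs]
      have hrest : ∀ e' ∈ (b :: rest').dropLast,
          PySem.Dict.contains (PySem.Dict.mk e') "start" = true := by
        intro e' he'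
        exact hst e' (List.mem_cons_of_mem e he')
      have step : pvG ns (e :: b :: rest')
          = pvPatchO ns e :: pvG (PySem.Dict.get? (PySem.Dict.mk e) "start") (b :: rest') := rfl
      rw [step, hsome, ih (some (pvStartD e)) hrest]
      rw [show (e :: b :: rest').reverse = (b :: rest').reverse ++ [e] by simp]
      rw [pvLink'_snoc]
      simp

lemma pvLink'_none : ∀ (c : List (List (String × String))), pvLink' c none = pvLink c := by
  intro c
  induction c with
  | nil => rfl
  | cons a rest ih =>
    cases rest with
    | nil => rfl
    | cons b rest' => simp only [pvLink', pvLink]; rw [ih]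

lemma pvDropLast_rev (c : List (List (String × String))) :
    c.reverse.dropLast = (c.drop 1).reverse := by
  cases c with
  | nil => rfl
  | cons a t => simp

-- ===== VERDICT (by name: the statement is the Claim_ definition above) =====
theorem merge_bump_gaps_py_spec : Claim_equal_merge_bump_gaps_py := by
  intro entries _hdom hpre
  unfold Spec_merge_bump_gaps_py merge_bump_gaps_py merge_bump_gaps_py_alt
  rw [pvFilter_phase entries [], List.nil_append, pvPhase2_link]
  set kept := entries.filter (fun e => !pvIsBump e) with hkept
  rw [pvFoldB, List.nil_append, pvF_filter]
  rw [List.filter_reverse, ← hkept]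
  have hst : ∀ e ∈ kept.reverse.dropLast,
      PySem.Dict.contains (PySem.Dict.mk e) "start" = true := by
    intro e he
    rw [pvDropLast_rev, List.mem_reverse] at he
    rw [Pre_merge_bump_gaps_py, Bool.and_eq_true] at hpre
    exact List.all_eq_true.mp hpre.2 e he
  rw [pvG_link' kept.reverse none hst, List.reverse_reverse, List.reverse_reverse,
    pvLink'_none]
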